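-- pv_equiv track=rewrite | github.com/joshanashakya/dissertation | workspace/dataset/java-python/GeeksForGeeks/3767/A/2.py | Min_Replace
-- ===== SOURCE A (Python) =====
-- MAX = 100005
--
-- def Min_Replace(arr, n, k):
--     arr.sort(reverse = False)
--
--     # Store the frequency of each element
--     freq = [0 for i in range(MAX)]
--
--     p = 0
--     freq[p] = 1
--
--     # Store the frequency of elements
--     for i in range(1, n, 1):
--         if (arr[i] == arr[i - 1]):
--             freq[p] += 1
--         else:
--             p += 1
--             freq[p] += 1
--
--     # Sort frequencies in descending order
--     freq.sort(reverse = True)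
--
--     # To store the required answer
--     ans = 0
--     for i in range(k, p + 1, 1):
--         ans += freq[i]
--
--     # Return the required answer
--     return ans
-- ===== SOURCE B (Python) =====
-- def Min_Replace(arr, n, k):
--     # Counting-selection instead of a second sort: histogram the value-counts
--     # (count-of-counts buckets) and walk candidate frequencies from n down,
--     # keeping the k most frequent values; answer = counted total - kept.
--     arr.sort()
--     counts = {}
--     for i in range(n):
--         counts[arr[i]] = counts.get(arr[i], 0) + 1
--     buckets = {}
--     total = 0
--     for c in counts.values():
--         buckets[c] = buckets.get(c, 0) + 1
--         total += c
--     kept = 0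
--     rem = k
--     f = n
--     while f > 0 and rem > 0:
--         t = min(rem, buckets.get(f, 0))
--         kept += t * f
--         rem -= t
--         f -= 1
--     return total - kept
-- ===== Notes on version B (the rewrite author's own statement) =====
-- stated objective: alternative
-- what changed: B replaces A's 100005-slot frequency table and its full descending comparison sort with a counting-selection: it histograms the value-counts into count-of-counts buckets and walks candidate frequencies from n downward, keeping the k most frequent values, returning counted-total minus kept (no sort of the frequencies at all).
-- intended difference: On n <= 0 with k <= 0 A returns 1 (its unconditional freq[0] = 1 invents a run in an empty prefix) while B returns 0, the intended count of replacements when nothing is counted. — e.g. on Min_Replace([], 0, 0): A returns 1, B returns 0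
-- outside the precondition, e.g. on Min_Replace([], 1, 1): A returns 0, B raises IndexError; on Min_Replace([], 0, -100005): A returns 2, B returns 0
import Mathlib
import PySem

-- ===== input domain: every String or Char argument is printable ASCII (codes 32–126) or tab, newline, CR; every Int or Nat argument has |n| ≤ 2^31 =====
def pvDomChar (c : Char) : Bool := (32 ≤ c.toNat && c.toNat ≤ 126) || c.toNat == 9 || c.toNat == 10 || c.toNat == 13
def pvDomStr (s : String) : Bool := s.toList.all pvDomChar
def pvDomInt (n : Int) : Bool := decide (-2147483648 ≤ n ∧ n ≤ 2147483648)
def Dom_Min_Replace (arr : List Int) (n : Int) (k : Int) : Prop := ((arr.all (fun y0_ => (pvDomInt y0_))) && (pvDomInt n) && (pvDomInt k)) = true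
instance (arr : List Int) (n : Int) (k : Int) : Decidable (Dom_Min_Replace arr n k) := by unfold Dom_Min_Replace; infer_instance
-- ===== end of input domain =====

-- B re-implements A by counting-selection: it hash-counts the sorted prefix, histograms the
-- value-counts into count-of-counts buckets and walks candidate frequencies from n downward,
-- keeping the k most frequent values (counted total minus kept); A builds a 100005-slot
-- frequency table, comparison-sorts it descending and sums the entries past the k-th.
-- Objective: alternative (the frequency sort disappears).
-- Python A and B both sort `arr` in place; the theorems are about the return value (the
-- mutation is identical in A and B).

-- ===== PORT A =====
-- literal transliteration of A; `p` stays ≥ 0 throughout (starts at 0, only incremented),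
-- so `.toNat` on it is exact.  `freq.sort(reverse=True)` is ported as the stable mergeSort
-- with the ≥ comparator: Python's list.sort is a stable sort, and on plain ints both produce
-- the identical list (PySem's quadratic insertion sort cannot evaluate the 100005-slot table).
def Min_Replace (arr : List Int) (n : Int) (k : Int) : Int :=
  let arr := PySem.List.sorted arr (fun x => x) false      -- arr.sort(reverse=False)
  let freq : List Int := (PySem.List.pyRange 0 100005).map (fun _ => 0)  -- [0 for i in range(MAX)]
  let p : Int := 0
  let freq := freq.set p.toNat 1                           -- freq[p] = 1
  let st := (PySem.List.pyRange 1 n).foldl (fun (st : Int × List Int) i =>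
      if PySem.List.pyGetD arr i 0 == PySem.List.pyGetD arr (i - 1) 0 then
        (st.1, st.2.set st.1.toNat (st.2.getD st.1.toNat 0 + 1))        -- freq[p] += 1
      else
        (st.1 + 1, st.2.set (st.1 + 1).toNat (st.2.getD (st.1 + 1).toNat 0 + 1)))  -- p += 1; freq[p] += 1
    (p, freq)
  let freq := st.2.mergeSort (fun a b => decide (b ≤ a))   -- freq.sort(reverse=True)
  (PySem.List.pyRange k (st.1 + 1)).foldl (fun ans i => ans + PySem.List.pyGetD freq i 0) 0

-- ===== PORT B =====
-- the while loop 'while f > 0 and rem > 0: …; f -= 1' as structural recursion on f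
-- (f enters as n.toNat: for n ≤ 0 the Python loop is never entered, exactly f = 0 here)
def pvWalkB (buckets : PySem.Dict Int Int) : Nat → Int → Int
  | 0, _ => 0
  | f + 1, rem =>
    if 0 < rem then
      let t := min rem (buckets.getD ((f : Int) + 1) 0)    -- t = min(rem, buckets.get(f, 0))
      t * ((f : Int) + 1) + pvWalkB buckets f (rem - t)    -- kept += t * f; rem -= t; f -= 1
    else 0

def Min_Replace_alt (arr : List Int) (n : Int) (k : Int) : Int :=
  let sarr := PySem.List.sorted arr (fun x => x) false     -- arr.sort()
  let counts := (PySem.List.pyRange 0 n).foldl             -- for i in range(n):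
    (fun (d : PySem.Dict Int Int) i =>                     --   counts[arr[i]] = counts.get(arr[i], 0) + 1
      d.insert (PySem.List.pyGetD sarr i 0) (d.getD (PySem.List.pyGetD sarr i 0) 0 + 1))
    PySem.Dict.empty                                       -- (arr[i] in range whenever Pre_ holds)
  let bt := counts.values.foldl                            -- for c in counts.values():
    (fun (st : PySem.Dict Int Int × Int) c =>              --   buckets[c] = buckets.get(c, 0) + 1
      (st.1.insert c (st.1.getD c 0 + 1), st.2 + c))       --   total += c
    (PySem.Dict.empty, 0)
  bt.2 - pvWalkB bt.1 n.toNat k                            -- descending-frequency walk; total - kept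

-- ===== PRECONDITION & SPEC =====
-- Pre_ requires n ≤ len(arr): beyond it B's counting loop raises IndexError (A's adjacent-
-- compare loop also does for n ≥ 2).  The two other conjuncts keep A's fixed 100005-slot
-- table in bounds (stated on n, which bounds the number of distinct counted values):
-- beyond 100005 distinct values A overflows the table (IndexError), and a very negative k
-- makes A's summation index wrap past the zero padding (IndexError below -100005,
-- re-reading counts at the wrap boundary).
def Pre_Min_Replace (arr : List Int) (n : Int) (k : Int) : Prop :=
  n ≤ arr.length ∧ n ≤ 100005 ∧ (max n 1) - 100005 ≤ k
instance (arr : List Int) (n : Int) (k : Int) : Decidable (Pre_Min_Replace arr n k) := by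
  unfold Pre_Min_Replace; infer_instance
def pvWitness_Min_Replace : List Int × Int × Int := ([2, 1, 2, 5], 3, 1)

-- On n ≤ 0 with k ≤ 0 A returns 1 (its unconditional `freq[0] = 1` invents a run in an
-- empty prefix) while B returns the intended 0: nothing is counted, nothing needs replacing.
def D_Min_Replace (arr : List Int) (n : Int) (k : Int) : Prop := n ≤ 0 ∧ k ≤ 0
instance (arr : List Int) (n : Int) (k : Int) : Decidable (D_Min_Replace arr n k) := by
  unfold D_Min_Replace; infer_instance

def Spec_Min_Replace (arr : List Int) (n : Int) (k : Int) (out : Int) : Prop :=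
  ¬ D_Min_Replace arr n k → out = Min_Replace_alt arr n k
instance (arr : List Int) (n : Int) (k : Int) (out : Int) : Decidable (Spec_Min_Replace arr n k out) := by
  unfold Spec_Min_Replace; infer_instance

def pvDiffWitness_Min_Replace : List Int × Int × Int := ([], 0, 0)
def pvDiffWitnessOut_Min_Replace : Int × Int := (1, 0)

-- ===== CLAIM (what is proved, stated in full; the proofs are below) =====
def Claim_unchanged_Min_Replace : Prop := ∀ (arr : List Int) (n : Int) (k : Int),
  Dom_Min_Replace arr n k → Pre_Min_Replace arr n k → Spec_Min_Replace arr n k (Min_Replace arr n k)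
def Claim_changed_Min_Replace : Prop :=
  Dom_Min_Replace (pvDiffWitness_Min_Replace.1) (pvDiffWitness_Min_Replace.2.1) (pvDiffWitness_Min_Replace.2.2) ∧
  Pre_Min_Replace (pvDiffWitness_Min_Replace.1) (pvDiffWitness_Min_Replace.2.1) (pvDiffWitness_Min_Replace.2.2) ∧
  D_Min_Replace (pvDiffWitness_Min_Replace.1) (pvDiffWitness_Min_Replace.2.1) (pvDiffWitness_Min_Replace.2.2) ∧
  Min_Replace (pvDiffWitness_Min_Replace.1) (pvDiffWitness_Min_Replace.2.1) (pvDiffWitness_Min_Replace.2.2) = pvDiffWitnessOut_Min_Replace.1 ∧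
  Min_Replace_alt (pvDiffWitness_Min_Replace.1) (pvDiffWitness_Min_Replace.2.1) (pvDiffWitness_Min_Replace.2.2) = pvDiffWitnessOut_Min_Replace.2 ∧
  pvDiffWitnessOut_Min_Replace.1 ≠ pvDiffWitnessOut_Min_Replace.2
def Claim_exact_Min_Replace : Prop := ∀ (arr : List Int) (n : Int) (k : Int),
  Dom_Min_Replace arr n k → Pre_Min_Replace arr n k → D_Min_Replace arr n k →
  Min_Replace arr n k ≠ Min_Replace_alt arr n k

-- ===== LEMMAS AND PROOFS =====

-- distinct values among the n smallest elements of arr (read off the sorted prefix)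
def pvDistinct (arr : List Int) (n : Int) : Nat :=
  (PySem.Set.ofList ((PySem.List.sorted arr (fun x => x) false).take n.toNat)).length

-- run lengths of the maximal blocks of equal adjacent elements (proof-side normal form)
def pvRunsAux : Int → Int → List Int → List Int
  | _, cnt, [] => [cnt]
  | cur, cnt, y :: ys => if y = cur then pvRunsAux cur (cnt + 1) ys else cnt :: pvRunsAux y 1 ys

def pvRuns : List Int → List Int
  | [] => []
  | x :: xs => pvRunsAux x 1 xs

theorem pvRunsAux_pos (xs : List Int) : ∀ (cur cnt : Int), 1 ≤ cnt →
    ∀ v ∈ pvRunsAux cur cnt xs, 1 ≤ v := by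
  induction xs with
  | nil => intro cur cnt h v hv; simp [pvRunsAux] at hv; omega
  | cons y ys ih =>
    intro cur cnt h v hv
    by_cases hyc : y = cur
    · exact ih cur (cnt + 1) (by omega) v (by simpa [pvRunsAux, hyc] using hv)
    · simp [pvRunsAux, hyc] at hv
      rcases hv with rfl | hv
      · exact h
      · exact ih y 1 le_rfl v hv

theorem pvRunsAux_le (xs : List Int) : ∀ (cur cnt : Int), 1 ≤ cnt →
    ∀ v ∈ pvRunsAux cur cnt xs, v ≤ cnt + xs.length := by
  induction xs with
  | nil => intro cur cnt _ v hv; simp [pvRunsAux] at hv; omega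
  | cons y ys ih =>
    intro cur cnt hc v hv
    by_cases hyc : y = cur
    · have := ih cur (cnt + 1) (by omega) v (by simpa [pvRunsAux, hyc] using hv)
      simp only [List.length_cons]
      omega
    · simp [pvRunsAux, hyc] at hv
      rcases hv with rfl | hv
      · simp; omega
      · have := ih y 1 le_rfl v hv
        simp only [List.length_cons]
        omega

-- values appended by a fresh insert
theorem pv_values_insert_fresh (d : PySem.Dict Int Int) (k v : Int) (h : d.contains k = false) :
    (d.insert k v).values = d.values ++ [v] := by
  have := PySem.Dict.items_insert_of_not_contains d v h
  simp only [PySem.Dict.values, this, List.map_append, List.map_cons, List.map_nil]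

theorem pv_not_contains_of_lt (d : PySem.Dict Int Int) (c : Int)
    (h : ∀ p ∈ d.items, p.1 < c) : d.contains c = false := by
  by_contra hc
  have hc' : d.contains c = true := by revert hc; cases d.contains c <;> simp
  rw [PySem.Dict.contains_iff_mem_keys] at hc'
  simp only [PySem.Dict.keys, List.mem_map] at hc'
  obtain ⟨p, hp, hpc⟩ := hc'
  have := h p hp
  omega

theorem pv_fold_counter (xs : List Int) : ∀ (cur cnt : Int) (d : PySem.Dict Int Int),
    List.Pairwise (· ≤ ·) (cur :: xs) → (∀ p ∈ d.items, p.1 < cur) →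
    (xs.foldl (fun d x => d.insert x (d.getD x 0 + 1)) (d.insert cur cnt)).values
      = d.values ++ pvRunsAux cur cnt xs := by
  induction xs with
  | nil =>
    intro cur cnt d _ hk
    simpa [pvRunsAux] using pv_values_insert_fresh d cur cnt (pv_not_contains_of_lt d cur hk)
  | cons y ys ih =>
    intro cur cnt d hp hk
    by_cases hyc : y = cur
    · subst hyc
      have h1 : (d.insert y cnt).getD y 0 = cnt := PySem.Dict.getD_insert_self d y cnt 0
      have hp' : List.Pairwise (· ≤ ·) (y :: ys) := by
        rcases hp with _ | ⟨hle, htl⟩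
        rcases htl with _ | ⟨hle2, htl2⟩
        exact List.Pairwise.cons (by intro b hb; exact hle2 b hb) htl2
      calc ((y :: ys).foldl (fun d x => d.insert x (d.getD x 0 + 1)) (d.insert y cnt)).values
          = (ys.foldl (fun d x => d.insert x (d.getD x 0 + 1)) (d.insert y (cnt + 1))).values := by
            simp only [List.foldl_cons, h1, PySem.Dict.insert_insert_self]
        _ = d.values ++ pvRunsAux y (cnt + 1) ys := ih y (cnt + 1) d hp' hk
        _ = d.values ++ pvRunsAux y cnt (y :: ys) := by simp [pvRunsAux]
    · have hcy : cur < y := by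
        rcases hp with _ | ⟨hle, _⟩
        have := hle y (by simp)
        omega
      have hnc : d.contains y = false := pv_not_contains_of_lt d y (fun p hp' => lt_trans (hk p hp') hcy)
      have hnc' : (d.insert cur cnt).contains y = false := by
        apply pv_not_contains_of_lt
        intro p hp'
        rw [PySem.Dict.items_insert_of_not_contains d cnt (pv_not_contains_of_lt d cur hk)] at hp'
        rcases List.mem_append.mp hp' with h | h
        · exact lt_trans (hk p h) hcy
        · simp at h; subst h; exact hcy
      have hgd : (d.insert cur cnt).getD y 0 = 0 :=
        PySem.Dict.getD_of_not_contains _ 0 hnc'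
      have hp' : List.Pairwise (· ≤ ·) (y :: ys) := by
        rcases hp with _ | ⟨_, htl⟩; exact htl
      have hk' : ∀ p ∈ (d.insert cur cnt).items, p.1 < y := by
        intro p hp''
        rw [PySem.Dict.items_insert_of_not_contains d cnt (pv_not_contains_of_lt d cur hk)] at hp''
        rcases List.mem_append.mp hp'' with h | h
        · exact lt_trans (hk p h) hcy
        · simp at h; subst h; exact hcy
      calc ((y :: ys).foldl (fun d x => d.insert x (d.getD x 0 + 1)) (d.insert cur cnt)).values
          = (ys.foldl (fun d x => d.insert x (d.getD x 0 + 1)) ((d.insert cur cnt).insert y 1)).values := by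
            simp only [List.foldl_cons, hgd]; norm_num
        _ = (d.insert cur cnt).values ++ pvRunsAux y 1 ys := ih y 1 (d.insert cur cnt) hp' hk'
        _ = d.values ++ pvRunsAux cur cnt (y :: ys) := by
            rw [pv_values_insert_fresh d cur cnt (pv_not_contains_of_lt d cur hk)]
            simp [pvRunsAux, hyc]

-- B's dict values on a sorted list are its run lengths
theorem pv_counter_values (s : List Int) (hs : List.Pairwise (· ≤ ·) s) :
    (s.foldl (fun (d : PySem.Dict Int Int) x => d.insert x (d.getD x 0 + 1)) PySem.Dict.empty).values
      = pvRuns s := by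
  cases s with
  | nil => simp [pvRuns]; rfl
  | cons x xs =>
    have h0 : (PySem.Dict.empty : PySem.Dict Int Int).getD x 0 = 0 := PySem.Dict.getD_empty x 0
    have : ((x :: xs).foldl (fun (d : PySem.Dict Int Int) x => d.insert x (d.getD x 0 + 1)) PySem.Dict.empty)
         = xs.foldl (fun d x => d.insert x (d.getD x 0 + 1)) (PySem.Dict.empty.insert x 1) := by
      simp only [List.foldl_cons, h0]; norm_num
    rw [this, pv_fold_counter xs x 1 PySem.Dict.empty hs (by intro p hp; simp [PySem.Dict.empty] at hp)]
    simp [pvRuns, PySem.Dict.values, PySem.Dict.empty]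

-- generic facts
theorem pv_getD_mid (rs : List Int) (c : Int) (z : List Int) :
    (rs ++ c :: z).getD rs.length 0 = c := by
  simp [List.getD_eq_getElem?_getD]

theorem pv_set_mid (rs : List Int) (c v : Int) (z : List Int) :
    (rs ++ c :: z).set rs.length v = rs ++ v :: z := by
  rw [List.set_append]
  simp

theorem pv_getD_mid2 (rs : List Int) (c : Int) (z : List Int) (hz : z ≠ []) :
    (rs ++ c :: z).getD (rs.length + 1) 0 = z.getD 0 0 := by
  have : (rs ++ c :: z)[rs.length + 1]? = z[0]? := by
    rw [List.getElem?_append_right (by simp)]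
    simp
  simp [List.getD_eq_getElem?_getD, this]

theorem pv_set_mid2 (rs : List Int) (c v : Int) (z : List Int) :
    (rs ++ c :: z).set (rs.length + 1) v = rs ++ c :: z.set 0 v := by
  rw [List.set_append]
  simp

theorem pv_drop_elem (l : List Int) (j : Nat) (c : Int) (t : List Int) (h : l.drop j = c :: t) :
    l[j]? = some c := by
  have : (l.drop j)[0]? = l[j + 0]? := List.getElem?_drop
  rw [h] at this
  simpa using this.symm

theorem pvRunsAux_len_pos (xs : List Int) : ∀ (cur cnt : Int), 1 ≤ (pvRunsAux cur cnt xs).length := by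
  induction xs with
  | nil => intro cur cnt; simp [pvRunsAux]
  | cons y ys ih =>
    intro cur cnt
    by_cases h : y = cur <;> simp [pvRunsAux, h]
    exact ih cur (cnt + 1)

theorem pvRunsAux_len_le (xs : List Int) : ∀ (cur cnt : Int),
    (pvRunsAux cur cnt xs).length ≤ 1 + xs.length := by
  induction xs with
  | nil => intro cur cnt; simp [pvRunsAux]
  | cons y ys ih =>
    intro cur cnt
    by_cases h : y = cur <;> simp [pvRunsAux, h]
    · have := ih cur (cnt + 1); omega
    · have := ih y 1; omega

theorem pv_loopA (sarr : List Int) (m : Nat) (hm : m ≤ sarr.length) :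
    ∀ (rest : List Int) (i : Nat) (cur cnt : Int) (rs : List Int),
    1 ≤ i → i + rest.length = m →
    (sarr.take m).drop (i - 1) = cur :: rest →
    rs.length + (pvRunsAux cur cnt rest).length ≤ 100005 →
    (PySem.List.pyRange (i : Int) (m : Int)).foldl
      (fun (st : Int × List Int) j =>
        if PySem.List.pyGetD sarr j 0 == PySem.List.pyGetD sarr (j - 1) 0 then
          (st.1, st.2.set st.1.toNat (st.2.getD st.1.toNat 0 + 1))
        else
          (st.1 + 1, st.2.set (st.1 + 1).toNat (st.2.getD (st.1 + 1).toNat 0 + 1)))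
      ((rs.length : Int), rs ++ cnt :: List.replicate (100005 - rs.length - 1) 0)
    = (((rs.length + (pvRunsAux cur cnt rest).length : Nat) : Int) - 1,
       (rs ++ pvRunsAux cur cnt rest) ++ List.replicate (100005 - (rs.length + (pvRunsAux cur cnt rest).length)) 0) := by
  intro rest
  induction rest with
  | nil =>
    intro i cur cnt rs hi hlen hdrop hb
    have him : i = m := by simpa using hlen
    rw [him, PySem.List.pyRange_one_eq_nil (le_refl _)]
    simp only [List.foldl_nil, pvRunsAux]
    simp only [Prod.mk.injEq]
    constructor
    · push_cast [List.length_cons, List.length_nil]; ring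
    · simp [Nat.sub_sub]
  | cons y ys ih =>
    intro i cur cnt rs hi hlen hdrop hb
    have hilt : i < m := by simp at hlen; omega
    have hdrop' : (sarr.take m).drop i = y :: ys := by
      have h1 : (sarr.take m).drop i = ((sarr.take m).drop (i - 1)).drop 1 := by
        rw [List.drop_drop]
        congr 1
        omega
      rw [h1, hdrop]
      simp
    have hgy : PySem.List.pyGetD sarr (i : Int) 0 = y := by
      have h1 : (sarr.take m)[i]? = some y := pv_drop_elem _ _ _ _ hdrop'
      have h2 : sarr[i]? = some y := by
        rwa [List.getElem?_take_of_lt hilt] at h1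
      rw [PySem.List.pyGetD_natCast]
      simp [List.getD_eq_getElem?_getD, h2]
    have hgc : PySem.List.pyGetD sarr ((i : Int) - 1) 0 = cur := by
      have h1 : (sarr.take m)[i - 1]? = some cur := pv_drop_elem _ _ _ _ hdrop
      have h2 : sarr[i - 1]? = some cur := by
        rwa [List.getElem?_take_of_lt (by omega)] at h1
      have h3 : (i : Int) - 1 = ((i - 1 : Nat) : Int) := by push_cast [hi]; ring
      rw [h3, PySem.List.pyGetD_natCast]
      simp [List.getD_eq_getElem?_getD, h2]
    rw [PySem.List.pyRange_one_cons (by exact_mod_cast hilt)]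
    rw [List.foldl_cons]
    have hcast : (i : Int) + 1 = ((i + 1 : Nat) : Int) := by push_cast; ring
    by_cases hyc : y = cur
    · -- same run continues
      have hcond : (PySem.List.pyGetD sarr (i : Int) 0 == PySem.List.pyGetD sarr ((i : Int) - 1) 0) = true := by
        rw [hgy, hgc, hyc]; simp
      rw [hcond]
      simp only [if_true]
      have hset : (rs ++ cnt :: List.replicate (100005 - rs.length - 1) 0).set (rs.length : Int).toNat
          ((rs ++ cnt :: List.replicate (100005 - rs.length - 1) 0).getD (rs.length : Int).toNat 0 + 1)
          = rs ++ (cnt + 1) :: List.replicate (100005 - rs.length - 1) 0 := by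
        rw [Int.toNat_natCast, pv_getD_mid, pv_set_mid]
      have hrw : pvRunsAux cur cnt (y :: ys) = pvRunsAux cur (cnt + 1) ys := by
        simp [pvRunsAux, hyc]
      rw [hrw] at hb ⊢
      have := ih (i + 1) cur (cnt + 1) rs (by omega) (by simp at hlen; omega)
        (by rw [Nat.add_sub_cancel, hdrop', hyc]) hb
      rw [hcast]
      simpa [hset] using this
    · -- new run starts
      have hcond : (PySem.List.pyGetD sarr (i : Int) 0 == PySem.List.pyGetD sarr ((i : Int) - 1) 0) = false := by
        rw [hgy, hgc]; simp [hyc]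
      rw [hcond]
      simp only [Bool.false_eq_true, if_false]
      have hrw : pvRunsAux cur cnt (y :: ys) = cnt :: pvRunsAux y 1 ys := by
        simp [pvRunsAux, hyc]
      rw [hrw] at hb
      have hlenA : 1 ≤ (pvRunsAux y 1 ys).length := pvRunsAux_len_pos ys y 1
      have hrep : (100005 - rs.length - 1) = ((100005 - rs.length - 2) + 1) := by
        simp at hb; omega
      have hz : List.replicate (100005 - rs.length - 1) (0 : Int)
          = 0 :: List.replicate (100005 - rs.length - 2) 0 := by
        rw [hrep, List.replicate_succ]
      have htn : ((rs.length : Int) + 1).toNat = rs.length + 1 := by omega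
      have hget : (rs ++ cnt :: List.replicate (100005 - rs.length - 1) 0).getD (rs.length + 1) 0 = 0 := by
        rw [hz, pv_getD_mid2]
        · simp
        · simp
      have hset : (rs ++ cnt :: List.replicate (100005 - rs.length - 1) 0).set (rs.length + 1) (0 + 1)
          = (rs ++ [cnt]) ++ 1 :: List.replicate (100005 - (rs.length + 1) - 1) 0 := by
        rw [hz, pv_set_mid2]
        simp only [List.set_cons_zero]
        have : 100005 - (rs.length + 1) - 1 = 100005 - rs.length - 2 := by omega
        rw [this]
        simp
      have := ih (i + 1) y 1 (rs ++ [cnt]) (by omega) (by simp at hlen; omega)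
        (by rw [Nat.add_sub_cancel]; exact hdrop')
        (by simp at hb ⊢; omega)
      rw [htn, hget, hset, hcast]
      have hlen2 : (rs ++ [cnt]).length = rs.length + 1 := by simp
      rw [hlen2] at this
      have hfix : ((rs.length + 1 : Nat) : Int) = (rs.length : Int) + 1 := by push_cast; ring
      rw [hfix] at this
      rw [this]
      simp only [Prod.mk.injEq]
      constructor
      · push_cast [hrw, List.length_cons, List.length_nil]; ring
      · simp [hrw]
        omega

-- the descending sort of the run-length table: runs first (descending), zero padding last
theorem pv_sorted_pad (L : List Int) (m0 : Nat) (hL : ∀ v ∈ L, 1 ≤ v) :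
    (L ++ List.replicate m0 0).mergeSort (fun a b => decide (b ≤ a))
      = (PySem.List.sorted L (fun x => x) false).reverse ++ List.replicate m0 0 := by
  apply List.Perm.eq_of_pairwise (le := fun a b : Int => b ≤ a)
  · intro a b _ _ h1 h2; omega
  · have := List.sorted_mergeSort (le := fun a b : Int => decide (b ≤ a))
      (by intro a b c h1 h2; simp at h1 h2 ⊢; omega)
      (by intro a b; simp; omega) (L ++ List.replicate m0 0)
    simpa using this
  · rw [List.pairwise_append]
    refine ⟨?_, ?_, ?_⟩
    · exact List.pairwise_reverse.mpr (PySem.List.sorted_pairwise L (fun x => x))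
    · apply List.pairwise_replicate.mpr
      simp
    · intro a ha b hb
      have ha' : a ∈ L := (PySem.List.sorted_perm L _ false).mem_iff.mp (List.mem_reverse.mp ha)
      have hb' : b = 0 := List.eq_of_mem_replicate hb
      have := hL a ha'
      omega
  · exact (List.mergeSort_perm _ _).trans
      (((((List.reverse_perm _).trans (PySem.List.sorted_perm L (fun x => x) false))).append_right
        (List.replicate m0 0)).symm)

theorem pv_map_range (DS rep : List Int) : ∀ (d a : Nat), DS.length - a = d → a ≤ DS.length →
    (PySem.List.pyRange (a : Int) (DS.length : Int)).map (fun i => PySem.List.pyGetD (DS ++ rep) i 0)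
      = DS.drop a := by
  intro d
  induction d with
  | zero =>
    intro a hd ha
    have : a = DS.length := by omega
    subst this
    rw [PySem.List.pyRange_one_eq_nil (le_refl _)]
    simp
  | succ d ihd =>
    intro a hd ha
    have halt : a < DS.length := by omega
    rw [PySem.List.pyRange_one_cons (by exact_mod_cast halt)]
    have hcast : (a : Int) + 1 = ((a + 1 : Nat) : Int) := by push_cast; ring
    rw [List.map_cons, hcast, ihd (a + 1) (by omega) (by omega)]
    have hget : PySem.List.pyGetD (DS ++ rep) (a : Int) 0 = DS[a] := by
      rw [PySem.List.pyGetD_natCast]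
      simp [List.getD_eq_getElem?_getD, List.getElem?_append_left halt, List.getElem?_eq_getElem halt]
    rw [hget, List.drop_eq_getElem_cons halt]

-- every summand over an index list vanishes: the fold keeps its accumulator
theorem pv_foldl_zero (g : Int → Int) (l : List Int) (h : ∀ i ∈ l, g i = 0) :
    ∀ (a : Int), l.foldl (fun acc i => acc + g i) a = a := by
  induction l with
  | nil => intro a; rfl
  | cons x xs ih =>
    intro a
    rw [List.foldl_cons, h x (by simp), add_zero]
    exact ih (fun i hi => h i (by simp [hi])) a

-- a wrapped (negative) index inside the zero padding reads 0
theorem pv_getD_neg (DS : List Int) (m : Nat) (i : Int)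
    (hlen : DS.length + m = 100005) (hlo : (DS.length : Int) - 100005 ≤ i) (hhi : i < 0) :
    PySem.List.pyGetD (DS ++ List.replicate m 0) i 0 = 0 := by
  have hlen2 : (DS ++ List.replicate m 0).length = 100005 := by simp; omega
  have hidx : PySem.List.pyIdx? (DS ++ List.replicate m 0).length i
      = some (100005 - (-i).toNat) := by
    rw [hlen2]
    simp only [PySem.List.pyIdx?]
    rw [if_neg (by omega), if_pos (by push_cast; omega)]
  have hge : DS.length ≤ 100005 - (-i).toNat := by omega
  have hlt : 100005 - (-i).toNat < 100005 := by omega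
  simp only [PySem.List.pyGetD, PySem.List.pyGet?, hidx, Option.bind_some]
  rw [List.getElem?_append_right hge]
  rw [List.getElem?_eq_getElem (by simp; omega)]
  simp

-- A's answer loop: the range sum over the padded sorted table is the k-th-onward suffix sum
-- (a negative k only adds wrapped reads of the zero padding)
theorem pv_sumA (DS : List Int) (m : Nat) (k : Int)
    (hlen : DS.length + m = 100005) (hk : (DS.length : Int) - 100005 ≤ k) :
    (PySem.List.pyRange k (DS.length : Int)).foldl
      (fun ans i => ans + PySem.List.pyGetD (DS ++ List.replicate m 0) i 0) 0
      = (DS.drop k.toNat).sum := by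
  by_cases hk0 : 0 ≤ k
  · by_cases h : k ≤ (DS.length : Int)
    · have hkk : k = ((k.toNat : Nat) : Int) := by omega
      rw [hkk, PySem.List.foldl_add, pv_map_range DS (List.replicate m 0) _ k.toNat rfl (by omega)]
      simp
      congr 2
      omega
    · rw [PySem.List.pyRange_one_eq_nil (by omega)]
      simp [List.drop_eq_nil_of_le (by omega : DS.length ≤ k.toNat)]
  · rw [PySem.List.pyRange_one_append k 0 (DS.length : Int) (by omega) (by positivity),
      List.foldl_append]
    rw [pv_foldl_zero _ _ (fun i hi => by
      have := (PySem.List.mem_pyRange_one).mp hi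
      exact pv_getD_neg DS m i hlen (by omega) (by omega)) 0]
    rw [PySem.List.foldl_add]
    have hmr := pv_map_range DS (List.replicate m 0) DS.length 0 (by omega) (Nat.zero_le _)
    simp only [Nat.cast_zero] at hmr
    rw [hmr]
    simp [show k.toNat = 0 by omega]

theorem pv_runs_len (s : List Int) (hs : List.Pairwise (· ≤ ·) s) :
    (pvRuns s).length = (PySem.Set.ofList s).length := by
  rw [← pv_counter_values s hs, PySem.Dict.foldl_insert_getD_add_one_eq_counter,
    ← PySem.Dict.keys_counter s]
  simp [PySem.Dict.values, PySem.Dict.keys]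

theorem pv_take_pairwise (arr : List Int) (m : Nat) :
    List.Pairwise (· ≤ ·) ((PySem.List.sorted arr (fun x => x) false).take m) :=
  List.Pairwise.sublist (List.take_sublist m _) (PySem.List.sorted_pairwise arr (fun x => x))

theorem pv_distinct_le (arr : List Int) (n : Int) : (pvDistinct arr n : Int) ≤ max n 1 := by
  set s := (PySem.List.sorted arr (fun x => x) false).take n.toNat with hs
  have hP : List.Pairwise (· ≤ ·) s := pv_take_pairwise arr n.toNat
  have h1 : pvDistinct arr n = (pvRuns s).length := (pv_runs_len s hP).symm
  have h2 : (pvRuns s).length ≤ max n.toNat 1 := by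
    cases hc : s with
    | nil => simp [pvRuns]
    | cons a as =>
      have h3 := pvRunsAux_len_le as a 1
      have h4 : s.length ≤ n.toNat := by rw [hs, List.length_take]; omega
      rw [hc] at h4
      simp only [pvRuns, List.length_cons] at h3 h4 ⊢
      omega
  rw [h1]
  omega

-- the counting loop over indices is the fold over the sorted length-n prefix
theorem pv_count_loop (sarr : List Int) (m : Nat) (hm : m ≤ sarr.length) :
    (PySem.List.pyRange 0 (m : Int)).foldl
      (fun (d : PySem.Dict Int Int) i =>
        d.insert (PySem.List.pyGetD sarr i 0) (d.getD (PySem.List.pyGetD sarr i 0) 0 + 1))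
      PySem.Dict.empty
    = (sarr.take m).foldl (fun d x => d.insert x (d.getD x 0 + 1)) PySem.Dict.empty := by
  have hlt : (sarr.take m).length = m := by rw [List.length_take]; omega
  have hmap := pv_map_range (sarr.take m) (sarr.drop m) (sarr.take m).length 0 (by omega)
    (Nat.zero_le _)
  rw [List.take_append_drop, hlt] at hmap
  simp only [Nat.cast_zero, List.drop_zero] at hmap
  rw [← hmap, List.foldl_map]

-- B's walk only reads buckets at frequencies 1..m
theorem pvWalkB_congr (b b' : PySem.Dict Int Int) : ∀ (m : Nat) (r : Int),
    (∀ f : Nat, 1 ≤ f → f ≤ m → b.getD (f : Int) 0 = b'.getD (f : Int) 0) →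
    pvWalkB b m r = pvWalkB b' m r := by
  intro m
  induction m with
  | zero => intro r _; rfl
  | succ f ih =>
    intro r h
    simp only [pvWalkB]
    rw [show ((f : Int) + 1) = ((f + 1 : Nat) : Int) by push_cast; ring,
      h (f + 1) (by omega) (by omega)]
    split_ifs with hr
    · rw [ih _ (fun g h1 h2 => h g h1 (by omega))]
    · rfl

-- splitting the maximal value off a descending sort
theorem pv_desc_split (L : List Int) (c : Int) (h : ∀ x ∈ L, x ≤ c) :
    (PySem.List.sorted L (fun x => x) false).reverse
      = List.replicate (L.count c) c
        ++ (PySem.List.sorted (L.filter (fun x => !(x == c))) (fun x => x) false).reverse := by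
  apply List.Perm.eq_of_pairwise (le := fun a b : Int => b ≤ a)
  · intro a b _ _ h1 h2; omega
  · exact List.pairwise_reverse.mpr (PySem.List.sorted_pairwise L (fun x => x))
  · rw [List.pairwise_append]
    refine ⟨?_, ?_, ?_⟩
    · apply List.pairwise_replicate.mpr
      simp
    · exact List.pairwise_reverse.mpr (PySem.List.sorted_pairwise _ (fun x => x))
    · intro a ha b hb
      have hb' : b ∈ L.filter (fun x => !(x == c)) :=
        (PySem.List.sorted_perm _ _ false).mem_iff.mp (List.mem_reverse.mp hb)
      have := h b (List.mem_of_mem_filter hb')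
      have := List.eq_of_mem_replicate ha
      omega
  · refine ((List.reverse_perm _).trans (PySem.List.sorted_perm L (fun x => x) false)).trans ?_
    refine ((List.filter_append_perm (fun x => x == c) L).symm).trans ?_
    rw [List.filter_beq]
    exact List.Perm.append_left _
      (((List.reverse_perm _).trans (PySem.List.sorted_perm _ (fun x => x) false)).symm)

-- B's descending-frequency walk over the count-of-counts buckets picks exactly the r
-- largest counts: it sums the r-prefix of the descending-sorted count list
theorem pvWalkB_counter : ∀ (m : Nat) (L : List Int),
    (∀ x ∈ L, 1 ≤ x ∧ x ≤ (m : Int)) → ∀ r : Int,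
    pvWalkB (PySem.Dict.counter L) m r
      = (((PySem.List.sorted L (fun x => x) false).reverse).take r.toNat).sum := by
  intro m
  induction m with
  | zero =>
    intro L hL r
    have hnil : L = [] := by
      cases L with
      | nil => rfl
      | cons x xs =>
        have := hL x (by simp)
        omega
    subst hnil
    rw [(PySem.List.sorted_eq_nil_iff [] (fun x => x) false).mpr rfl]
    simp [pvWalkB]
  | succ m ih =>
    intro L hL r
    simp only [pvWalkB]
    split_ifs with hr
    · -- r > 0
      have hgc : (PySem.Dict.counter L).getD ((m : Int) + 1) 0 = (L.count ((m : Int) + 1) : Int) :=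
        PySem.Dict.getD_counter L ((m : Int) + 1)
      set c : Nat := L.count ((m : Int) + 1) with hc
      set L' : List Int := L.filter (fun x => !(x == (m : Int) + 1)) with hL'
      set t : Int := min r ((PySem.Dict.counter L).getD ((m : Int) + 1) 0) with ht
      have htc : t = min r (c : Int) := by rw [ht, hgc]
      have hwalk : pvWalkB (PySem.Dict.counter L) m (r - t) = pvWalkB (PySem.Dict.counter L') m (r - t) := by
        apply pvWalkB_congr
        intro f h1 h2
        rw [PySem.Dict.getD_counter, PySem.Dict.getD_counter]
        have : L'.count (f : Int) = L.count (f : Int) := by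
          rw [hL']
          exact List.count_filter (by simp; omega)
        rw [this]
      have hL'b : ∀ x ∈ L', 1 ≤ x ∧ x ≤ (m : Int) := by
        intro x hx
        rw [hL'] at hx
        have h1 := List.mem_of_mem_filter hx
        have h2 := List.of_mem_filter hx
        simp at h2
        have := hL x h1
        push_cast at this ⊢
        omega
      rw [hwalk, ih L' hL'b (r - t)]
      rw [pv_desc_split L ((m : Int) + 1) (by intro x hx; have := (hL x hx).2; push_cast; omega)]
      rw [List.take_append, List.sum_append, List.take_replicate,
        List.sum_replicate, List.length_replicate]
      rw [← hL', ← hc]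
      have hc0 : (0 : Int) ≤ (c : Int) := by positivity
      have h1 : r.toNat - c = (r - t).toNat := by omega
      have h2 : (min r.toNat c) • ((m : Int) + 1) = t * ((m : Int) + 1) := by
        rw [nsmul_eq_mul]
        congr 1
        omega
      rw [h1, h2]
    · -- r ≤ 0
      rw [show r.toNat = 0 by omega]
      simp

theorem pv_B_nonpos (arr : List Int) (n k : Int) (hn : n ≤ 0) : Min_Replace_alt arr n k = 0 := by
  simp only [Min_Replace_alt]
  rw [PySem.List.pyRange_one_eq_nil hn]
  simp only [List.foldl_nil]
  have hv : (PySem.Dict.empty : PySem.Dict Int Int).values = [] := by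
    simp [PySem.Dict.empty, PySem.Dict.values]
  rw [hv]
  simp only [List.foldl_nil]
  rw [show n.toNat = 0 by omega]
  rfl

-- B in closed form: total of the run lengths minus the k largest of them
theorem pv_B_normal (arr : List Int) (n k : Int) (hn : 0 ≤ n) (hn2 : n ≤ arr.length) :
    Min_Replace_alt arr n k
      = (pvRuns ((PySem.List.sorted arr (fun x => x) false).take n.toNat)).sum
        - ((((PySem.List.sorted (pvRuns ((PySem.List.sorted arr (fun x => x) false).take n.toNat))
            (fun x => x) false).reverse)).take k.toNat).sum := by
  simp only [Min_Replace_alt]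
  set sarr := PySem.List.sorted arr (fun x => x) false with hsarr
  set s := sarr.take n.toNat with hsdef
  have hm : n.toNat ≤ sarr.length := by rw [hsarr, PySem.List.length_sorted]; omega
  have hcl : (PySem.List.pyRange 0 n).foldl
      (fun (d : PySem.Dict Int Int) i =>
        d.insert (PySem.List.pyGetD sarr i 0) (d.getD (PySem.List.pyGetD sarr i 0) 0 + 1))
      PySem.Dict.empty
      = s.foldl (fun d x => d.insert x (d.getD x 0 + 1)) PySem.Dict.empty := by
    rw [show n = ((n.toNat : Nat) : Int) by omega]
    exact pv_count_loop sarr n.toNat hm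
  rw [hcl, pv_counter_values s (by rw [hsdef, hsarr]; exact pv_take_pairwise arr n.toNat)]
  rw [PySem.List.foldl_prod_mk (fun (d : PySem.Dict Int Int) (c : Int) => d.insert c (d.getD c 0 + 1))
    (fun (t : Int) (c : Int) => t + c)]
  simp only [PySem.Dict.foldl_insert_getD_add_one_eq_counter]
  have hbnd : ∀ x ∈ pvRuns s, 1 ≤ x ∧ x ≤ (n.toNat : Int) := by
    intro x hx
    cases hseq : s with
    | nil => rw [hseq] at hx; simp [pvRuns] at hx
    | cons a as =>
      rw [hseq] at hx
      simp only [pvRuns] at hx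
      refine ⟨pvRunsAux_pos as a 1 le_rfl x hx, ?_⟩
      have h1 := pvRunsAux_le as a 1 le_rfl x hx
      have h2 : s.length ≤ n.toNat := by rw [hsdef, List.length_take]; omega
      rw [hseq] at h2
      simp at h2
      omega
  rw [pvWalkB_counter n.toNat (pvRuns s) hbnd k]
  have hsum : (pvRuns s).foldl (fun t c => t + c) 0 = (pvRuns s).sum := by
    rw [List.sum_eq_foldl]
  rw [hsum]

set_option maxRecDepth 8192 in
theorem pv_A_normal (arr : List Int) (n k : Int) (hn : 1 ≤ n) (hn2 : n ≤ arr.length)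
    (hb : pvDistinct arr n ≤ 100005)
    (hk : (max (pvDistinct arr n : Int) 1) - 100005 ≤ k) :
    Min_Replace arr n k
      = (((PySem.List.sorted (pvRuns ((PySem.List.sorted arr (fun x => x) false).take n.toNat))
          (fun x => x) false).reverse).drop k.toNat).sum := by
  simp only [Min_Replace]
  set sarr := PySem.List.sorted arr (fun x => x) false with hsarr
  set m := n.toNat with hmdef
  set s := sarr.take m with hsdef
  have hmlen : m ≤ sarr.length := by
    rw [hsarr, PySem.List.length_sorted]; omega
  have hslen : s.length = m := by
    rw [hsdef, List.length_take]; omega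
  have hm1 : 1 ≤ m := by omega
  obtain ⟨x, xs, hxs⟩ : ∃ x xs, s = x :: xs := by
    cases hcs : s with
    | nil => rw [hcs] at hslen; simp at hslen; omega
    | cons a b => exact ⟨a, b, rfl⟩
  have hsP : List.Pairwise (· ≤ ·) s := by rw [hsdef, hsarr]; exact pv_take_pairwise arr m
  have hL : pvRuns s = pvRunsAux x 1 xs := by rw [hxs]; rfl
  have hDD : (pvRuns s).length = pvDistinct arr n := by
    rw [pv_runs_len s hsP, pvDistinct, ← hmdef, ← hsarr, ← hsdef]
  have hLb : (pvRunsAux x 1 xs).length ≤ 100005 := by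
    rw [← hL, hDD]; exact hb
  have hinit : ((PySem.List.pyRange 0 100005).map (fun _ => (0 : Int))).set ((0 : Int)).toNat 1
      = ([] : List Int) ++ 1 :: List.replicate (100005 - ([] : List Int).length - 1) 0 := by
    have h1 : (PySem.List.pyRange 0 100005).map (fun _ => (0 : Int)) = List.replicate 100005 0 := by
      rw [List.map_const', PySem.List.length_pyRange_one]
      rfl
    rw [h1, show (100005 : Nat) = 100004 + 1 by norm_num, List.replicate_succ]
    rfl
  have hloop := pv_loopA sarr m hmlen xs 1 x 1 [] le_rfl
    (by rw [hxs] at hslen; simp at hslen; omega)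
    (by simp only [Nat.sub_self, List.drop_zero, ← hsdef]; exact hxs)
    (by simpa using hLb)
  rw [show n = ((m : Nat) : Int) by omega]
  rw [hinit]
  simp only [List.nil_append, List.length_nil, Nat.cast_zero, Nat.cast_one, Nat.zero_add,
    Nat.sub_zero] at hloop ⊢
  rw [hloop]
  have hpos : ∀ v ∈ pvRunsAux x 1 xs, 1 ≤ v := pvRunsAux_pos xs x 1 le_rfl
  rw [pv_sorted_pad _ _ hpos]
  have hrevlen : ((PySem.List.sorted (pvRunsAux x 1 xs) (fun x => x) false).reverse).length
      = (pvRunsAux x 1 xs).length := by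
    rw [List.length_reverse, PySem.List.length_sorted]
  have hlen2 : ((pvRunsAux x 1 xs).length : Int) - 1 + 1
      = (((PySem.List.sorted (pvRunsAux x 1 xs) (fun x => x) false).reverse).length : Int) := by
    rw [hrevlen]; ring
  rw [hlen2, pv_sumA _ _ k (by rw [hrevlen]; omega)
    (by rw [hrevlen, ← hL, hDD]; omega), hL]

set_option maxRecDepth 8192 in
theorem pv_A_zero (arr : List Int) (n k : Int) (hn : n ≤ 0) (hk : -100004 ≤ k) :
    Min_Replace arr n k = ((([1] : List Int).drop k.toNat).sum) := by
  simp only [Min_Replace]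
  rw [PySem.List.pyRange_one_eq_nil (by omega : n ≤ 1)]
  simp only [List.foldl_nil]
  have hinit : ((PySem.List.pyRange 0 100005).map (fun _ => (0 : Int))).set ((0 : Int)).toNat 1
      = ([1] : List Int) ++ List.replicate 100004 0 := by
    have h1 : (PySem.List.pyRange 0 100005).map (fun _ => (0 : Int)) = List.replicate 100005 0 := by
      rw [List.map_const', PySem.List.length_pyRange_one]
      rfl
    rw [h1, show (100005 : Nat) = 100004 + 1 by norm_num, List.replicate_succ]
    rfl
  rw [hinit, pv_sorted_pad [1] 100004 (by intro v hv; simp at hv; omega)]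
  have hone : PySem.List.sorted ([1] : List Int) (fun x => x) false = [1] := by
    apply PySem.List.sorted_eq_self_of_pairwise
    simp
  rw [hone, show ([1] : List Int).reverse = [1] from rfl]
  rw [show ((0 : Int), ([1] : List Int) ++ List.replicate 100004 0).1 + 1
      = ((([1] : List Int).length : Nat) : Int) by simp]
  exact pv_sumA [1] 100004 k (by norm_num) (by simp; omega)

-- ===== VERDICT (by name: the statement is the Claim_ definition above) =====
theorem Min_Replace_spec : Claim_unchanged_Min_Replace := by
  intro arr n k _ hpre hD
  obtain ⟨hn2, hb0, hk0⟩ := hpre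
  have hdle := pv_distinct_le arr n
  have hb : pvDistinct arr n ≤ 100005 := by omega
  have hk : (max (pvDistinct arr n : Int) 1) - 100005 ≤ k := by omega
  by_cases hz : n ≤ 0
  · have hk1 : 1 ≤ k := by
      by_cases h : k ≤ 0
      · exact absurd ⟨hz, h⟩ hD
      · omega
    have hk4 : -100004 ≤ k := by omega
    rw [pv_A_zero arr n k hz hk4, pv_B_nonpos arr n k hz,
      show k.toNat = (k.toNat - 1) + 1 by omega]
    simp
  · have h1 : 1 ≤ n := by omega
    have hn : 0 ≤ n := by omega
    rw [pv_A_normal arr n k h1 hn2 hb hk, pv_B_normal arr n k hn hn2]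
    set s := (PySem.List.sorted arr (fun x => x) false).take n.toNat with hsdef
    set DS := (PySem.List.sorted (pvRuns s) (fun x => x) false).reverse with hDS
    have hvs : (pvRuns s).sum = DS.sum := by
      rw [hDS, List.sum_reverse]
      exact ((PySem.List.sorted_perm (pvRuns s) (fun x => x) false).sum_eq).symm
    rw [hvs]
    have hsplit : (DS.take k.toNat).sum + (DS.drop k.toNat).sum = DS.sum := by
      rw [← List.sum_append, List.take_append_drop]
    omega
theorem Min_Replace_changed : Claim_changed_Min_Replace := by
  unfold Claim_changed_Min_Replace
  refine ⟨by decide, by decide, by decide, ?_, ?_, by decide⟩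
  · show Min_Replace [] 0 0 = (1 : Int)
    rw [pv_A_zero [] 0 0 le_rfl (by norm_num)]
    rfl
  · show Min_Replace_alt [] 0 0 = (0 : Int)
    exact pv_B_nonpos [] 0 0 le_rfl
theorem Min_Replace_tight : Claim_exact_Min_Replace := by
  intro arr n k _ hpre hd
  obtain ⟨hn0, hk0⟩ := hd
  obtain ⟨_, _, hk⟩ := hpre
  have hk4 : -100004 ≤ k := by omega
  have hA : Min_Replace arr n k = 1 := by
    rw [pv_A_zero arr n k hn0 hk4, show k.toNat = 0 by omega]
    rfl
  rw [hA, pv_B_nonpos arr n k hn0]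
  decide
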